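-- pv_equiv track=rewrite | github.com/takahashi-3/test2_CoRec | CoRec/predict_stanford.py | getLabels
-- ===== SOURCE A (Python) =====
-- def getLabels(s, spans):
--     if spans is None:
--         return None
--
--     labels_set = []
--     for span in spans:
--         if (len(span) < 2):
--             continue
--         if spanChecker(span):
--             l = len(span)
--             conj_word_id = span[l-1][0] - 1
--             start_id = span[0][0]
--             end_id = span[l-1][1]
--             labels = []
--
--             for j in range(0,l):
--                 cur_str = "I-before"
--                 if j == 0:
--                     k = 0
--                     first = True
--                     while (k < start_id):
--                         labels.append('O')
--                         k += 1
--                     i = span[j][0]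
--                     while (i < span[j+1][0]):
--                         if i == conj_word_id:
--                             labels.append('C')
--                         else:
--                             if first == True:
--                                 labels.append("B-before")
--                                 first = False
--                             else:
--                                 labels.append(cur_str)
--                         i += 1
--
--                 elif (j == l-1):
--                     i = span[j][0]
--                     first = True
--                     while (i <= end_id):
--                         if first == True:
--                             labels.append('B-after')
--                             first = False
--                         else:
--                             labels.append('I-after')
--                         i += 1
--                     k = end_id + 1
--                     while (k < len(s)):
--                         labels.append('O')
--                         k += 1
--
--                 else:
--                     i = span[j][0]
--                     first = True
--                     while (i < span[j+1][0]):
--                         if i == conj_word_id: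
--                             labels.append('C')
--                         else:
--                             if first == True:
--                                 labels.append("B-before")
--                                 first = False
--                             else:
--                                 labels.append(cur_str)
--                         i += 1
--
--             labels_set.append(labels)
--     return labels_set
--
-- def spanChecker(span):
--     l = len(span)
--     result = True
--     for i in range(0,l):
--         if i < l - 1:
--             diff = span[i+1][0] - span[i][1]
--             if diff != 2 and diff != 3:
--                 result = False
--     return result
-- ===== SOURCE B (Python) =====
-- def getLabels(s, spans):
--     if spans is None:
--         return None
--     return [_spanLabels(len(s), span) for span in spans
--             if len(span) >= 2 and all(b[0] - a[1] in (2, 3) for a, b in zip(span, span[1:]))]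
--
-- def _spanLabels(n, span):
--     conj = span[-1][0] - 1
--     start_id = span[0][0]
--     end_id = span[-1][1]
--     labels = ['O'] * max(0, start_id)
--     for (a, _), (b, _) in zip(span, span[1:]):
--         labels += _segment(a, b, conj)
--     after = end_id - span[-1][0] + 1
--     if after >= 1:
--         labels += ['B-after'] + ['I-after'] * (after - 1)
--     labels += ['O'] * max(0, n - end_id - 1)
--     return labels
--
-- def _segment(a, b, c):
--     # labels for positions a..b-1: 'C' at position c, 'B-before' at the first
--     # non-C position, 'I-before' elsewhere -- built by replication, no scan
--     if b <= a:
--         return []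
--     if c == a:
--         return ['C'] + (['B-before'] + ['I-before'] * (b - a - 2) if b - a > 1 else [])
--     if a < c < b:
--         return ['B-before'] + ['I-before'] * (c - a - 1) + ['C'] + ['I-before'] * (b - c - 1)
--     return ['B-before'] + ['I-before'] * (b - a - 1)
-- ===== Notes on version B (the rewrite author's own statement) =====
-- stated objective: alternative
-- what changed: The per-span three-phase nested while loops that emit one token label at a time are replaced by closed-form list construction: each inter-segment block, the after-block and the O-paddings are built by case analysis on the conjunction position with list replication and concatenation over zip(span, span[1:]), and the outer accumulator loop and index-range spanChecker become comprehensions/all over adjacent pairs.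
import Mathlib
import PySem

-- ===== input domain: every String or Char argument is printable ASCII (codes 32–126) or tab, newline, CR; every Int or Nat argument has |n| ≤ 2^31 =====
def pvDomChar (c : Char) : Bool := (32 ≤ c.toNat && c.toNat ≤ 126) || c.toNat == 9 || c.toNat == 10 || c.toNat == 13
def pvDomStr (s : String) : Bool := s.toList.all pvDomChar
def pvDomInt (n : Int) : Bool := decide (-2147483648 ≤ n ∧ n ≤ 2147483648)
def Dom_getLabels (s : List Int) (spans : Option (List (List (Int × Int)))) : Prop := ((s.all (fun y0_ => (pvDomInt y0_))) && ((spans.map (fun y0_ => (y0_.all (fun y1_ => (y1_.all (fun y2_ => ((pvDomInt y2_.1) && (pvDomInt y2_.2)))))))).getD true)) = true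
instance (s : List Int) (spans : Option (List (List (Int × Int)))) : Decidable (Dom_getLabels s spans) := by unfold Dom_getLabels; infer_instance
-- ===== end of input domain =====

-- B replaces A's per-token three-phase nested while loops by closed-form block construction
-- (replication + concatenation over adjacent span pairs); same cost, alternative decomposition.


-- ===== PORT A =====
-- spanChecker: fold over range(0, l) with the i < l-1 guard, exactly as in the Python
def spanChecker (span : List (Int × Int)) : Bool :=
  let l : Int := span.length
  (PySem.List.pyRange 0 l 1).foldl (fun result i =>
    if i < l - 1 then
      let diff := (PySem.List.pyGetD span (i + 1) (0, 0)).1 - (PySem.List.pyGetD span i (0, 0)).2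
      if diff ≠ 2 ∧ diff ≠ 3 then false else result
    else result) true

-- while (k < bound): labels.append('O'); k += 1
def loopO (k bound : Int) (acc : List String) : List String :=
  if _h : k < bound then loopO (k + 1) bound (acc ++ ["O"]) else acc
termination_by (bound - k).toNat
decreasing_by omega

-- while (i < bound): 'C' / first 'B-before' / cur_str = "I-before"; i += 1
def loopBefore (i bound conj : Int) (first : Bool) (acc : List String) : List String :=
  if _h : i < bound then
    if i = conj then loopBefore (i + 1) bound conj first (acc ++ ["C"])
    else if first then loopBefore (i + 1) bound conj false (acc ++ ["B-before"])
    else loopBefore (i + 1) bound conj false (acc ++ ["I-before"])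
  else acc
termination_by (bound - i).toNat
decreasing_by all_goals omega

-- while (i <= end_id): first 'B-after' else 'I-after'; i += 1
def loopAfter (i endId : Int) (first : Bool) (acc : List String) : List String :=
  if _h : i ≤ endId then
    if first then loopAfter (i + 1) endId false (acc ++ ["B-after"])
    else loopAfter (i + 1) endId false (acc ++ ["I-after"])
  else acc
termination_by (endId + 1 - i).toNat
decreasing_by all_goals omega

-- the body of A's `for j in range(0, l)` loop (the labels construction for one accepted span)
def pvAspan (slen : Int) (span : List (Int × Int)) : List String :=
  let l : Int := span.length
  let conj := (PySem.List.pyGetD span (l - 1) (0, 0)).1 - 1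
  let start_id := (PySem.List.pyGetD span 0 (0, 0)).1
  let end_id := (PySem.List.pyGetD span (l - 1) (0, 0)).2
  (PySem.List.pyRange 0 l 1).foldl (fun labels j =>
    if j = 0 then
      loopBefore (PySem.List.pyGetD span j (0, 0)).1 (PySem.List.pyGetD span (j + 1) (0, 0)).1
        conj true (loopO 0 start_id labels)
    else if j = l - 1 then
      loopO (end_id + 1) slen (loopAfter (PySem.List.pyGetD span j (0, 0)).1 end_id true labels)
    else
      loopBefore (PySem.List.pyGetD span j (0, 0)).1 (PySem.List.pyGetD span (j + 1) (0, 0)).1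
        conj true labels) []

def getLabels (s : List Int) (spans : Option (List (List (Int × Int)))) : Option (List (List String)) :=
  match spans with
  | none => none
  | some sp => some (sp.foldl (fun labels_set span =>
      if span.length < 2 then labels_set
      else if spanChecker span then labels_set ++ [pvAspan (s.length : Int) span]
      else labels_set) [])

-- ===== PORT B =====
-- closed-form labels for positions a..b-1 ('C' at c, 'B-before' at the first non-C position)
def segAlt (a b c : Int) : List String :=
  if b ≤ a then []
  else if c = a then
    ["C"] ++ (if b - a > 1 then ["B-before"] ++ List.replicate (b - a - 2).toNat "I-before" else [])
  else if a < c ∧ c < b then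
    ["B-before"] ++ List.replicate (c - a - 1).toNat "I-before" ++ ["C"] ++
      List.replicate (b - c - 1).toNat "I-before"
  else ["B-before"] ++ List.replicate (b - a - 1).toNat "I-before"

def checkAlt (span : List (Int × Int)) : Bool :=
  (span.zip span.tail).all (fun p => p.2.1 - p.1.2 == 2 || p.2.1 - p.1.2 == 3)

def spanLabelsAlt (n : Int) (span : List (Int × Int)) : List String :=
  let conj := (PySem.List.pyGetD span (-1) (0, 0)).1 - 1
  let start_id := (PySem.List.pyGetD span 0 (0, 0)).1
  let end_id := (PySem.List.pyGetD span (-1) (0, 0)).2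
  let labels := List.replicate (max 0 start_id).toNat "O"
  let labels := labels ++ (span.zip span.tail).flatMap (fun p => segAlt p.1.1 p.2.1 conj)
  let after := end_id - (PySem.List.pyGetD span (-1) (0, 0)).1 + 1
  let labels := if after ≥ 1 then
      labels ++ ["B-after"] ++ List.replicate (after - 1).toNat "I-after"
    else labels
  labels ++ List.replicate (max 0 (n - end_id - 1)).toNat "O"

def getLabels_alt (s : List Int) (spans : Option (List (List (Int × Int)))) : Option (List (List String)) :=
  spans.map (fun sp =>
    (sp.filter (fun span => decide (span.length ≥ 2) && checkAlt span)).map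
      (spanLabelsAlt (s.length : Int)))

-- ===== PRECONDITION & SPEC =====
def Spec_getLabels (s : List Int) (spans : Option (List (List (Int × Int)))) (out : Option (List (List String))) : Prop := out = getLabels_alt s spans
instance (s : List Int) (spans : Option (List (List (Int × Int)))) (out : Option (List (List String))) : Decidable (Spec_getLabels s spans out) := by unfold Spec_getLabels; infer_instance

-- ===== CLAIM (what is proved, stated in full; the proofs are below) =====
def Claim_equal_getLabels : Prop := ∀ (s : List Int) (spans : Option (List (List (Int × Int)))), Dom_getLabels s spans → Spec_getLabels s spans (getLabels s spans)

-- ===== LEMMAS AND PROOFS =====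

lemma loopO_eq (b : Int) : ∀ (k : Int) (acc : List String),
    loopO k b acc = acc ++ List.replicate (b - k).toNat "O" := by
  intro k acc
  generalize hn : (b - k).toNat = n
  induction n generalizing k acc with
  | zero => rw [loopO, dif_neg (by omega)]; simp
  | succ n ih =>
    rw [loopO, dif_pos (by omega), ih (k + 1) _ (by omega)]
    simp [List.replicate_succ, List.append_assoc]

lemma loopAfter_false (e : Int) : ∀ (i : Int) (acc : List String),
    loopAfter i e false acc = acc ++ List.replicate (e + 1 - i).toNat "I-after" := by
  intro i acc
  generalize hn : (e + 1 - i).toNat = n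
  induction n generalizing i acc with
  | zero => rw [loopAfter, dif_neg (by omega)]; simp
  | succ n ih =>
    rw [loopAfter, dif_pos (by omega)]
    simp only [Bool.false_eq_true, if_false]
    rw [ih (i + 1) _ (by omega)]
    simp [List.replicate_succ, List.append_assoc]

lemma loopAfter_true (e i : Int) (acc : List String) :
    loopAfter i e true acc =
      acc ++ (if i ≤ e then "B-after" :: List.replicate (e - i).toNat "I-after" else []) := by
  rw [loopAfter]
  by_cases h : i ≤ e
  · rw [dif_pos h, if_pos h]
    simp only [if_true]
    rw [loopAfter_false]
    simp [List.append_assoc]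
  · rw [dif_neg h, if_neg h]; simp

lemma loopBefore_false (b c : Int) : ∀ (i : Int) (acc : List String),
    loopBefore i b c false acc =
      acc ++ (PySem.List.pyRange i b 1).map (fun x => if x = c then "C" else "I-before") := by
  intro i acc
  generalize hn : (b - i).toNat = n
  induction n generalizing i acc with
  | zero =>
    rw [loopBefore, dif_neg (by omega), PySem.List.pyRange_one_eq_nil (by omega)]
    simp
  | succ n ih =>
    rw [loopBefore, dif_pos (by omega), PySem.List.pyRange_one_cons (by omega)]
    by_cases hc : i = c
    · rw [if_pos hc, ih (i + 1) _ (by omega)]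
      simp [hc, List.append_assoc]
    · rw [if_neg hc]
      simp only [Bool.false_eq_true, if_false]
      rw [ih (i + 1) _ (by omega)]
      simp [hc, List.append_assoc]

lemma map_range_no_c (a b c : Int) (h : c < a ∨ b ≤ c) :
    (PySem.List.pyRange a b 1).map (fun x => if x = c then "C" else "I-before") =
      List.replicate (b - a).toNat "I-before" := by
  rw [List.map_congr_left (g := fun _ => "I-before") (fun x hx => by
    rw [PySem.List.mem_pyRange_one] at hx
    rw [if_neg (by omega)])]
  rw [List.map_const', PySem.List.length_pyRange_one]

lemma map_range_with_c (a b c : Int) (h1 : a ≤ c) (h2 : c < b) :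
    (PySem.List.pyRange a b 1).map (fun x => if x = c then "C" else "I-before") =
      List.replicate (c - a).toNat "I-before" ++ ["C"] ++
        List.replicate (b - c - 1).toNat "I-before" := by
  rw [PySem.List.pyRange_one_append a c b h1 (by omega), List.map_append,
    PySem.List.pyRange_one_cons (by omega : c < b), List.map_cons,
    map_range_no_c a c c (by omega), map_range_no_c (c + 1) b c (by omega)]
  have : (b - (c + 1)).toNat = (b - c - 1).toNat := by omega
  rw [this]
  simp

lemma loopBefore_true (a b c : Int) (acc : List String) :
    loopBefore a b c true acc = acc ++ segAlt a b c := by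
  rw [loopBefore]
  by_cases hab : a < b
  · rw [dif_pos hab]
    by_cases hc : a = c
    · rw [if_pos hc, loopBefore]
      by_cases hb1 : a + 1 < b
      · rw [dif_pos hb1, if_neg (by omega : ¬ a + 1 = c)]
        simp only [if_true]
        rw [loopBefore_false, map_range_no_c (a + 1 + 1) b c (by omega)]
        rw [segAlt, if_neg (by omega), if_pos hc.symm, if_pos (by omega)]
        have : (b - (a + 1 + 1)).toNat = (b - a - 2).toNat := by omega
        rw [this]
        simp [List.append_assoc, hc]
      · rw [dif_neg hb1]
        rw [segAlt, if_neg (by omega), if_pos hc.symm, if_neg (by omega)]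
        simp
    · rw [if_neg hc]
      simp only [if_true]
      rw [loopBefore_false]
      by_cases hmid : a < c ∧ c < b
      · rw [map_range_with_c (a + 1) b c (by omega) (by omega)]
        rw [segAlt, if_neg (by omega), if_neg (fun h => hc h.symm), if_pos hmid]
        have : (c - (a + 1)).toNat = (c - a - 1).toNat := by omega
        rw [this]
        simp [List.append_assoc]
      · rw [map_range_no_c (a + 1) b c (by omega)]
        rw [segAlt, if_neg (by omega), if_neg (fun h => hc h.symm), if_neg hmid]
        have : (b - (a + 1)).toNat = (b - a - 1).toNat := by omega
        rw [this]
        simp [List.append_assoc]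
  · rw [dif_neg hab]
    rw [segAlt, if_pos (by omega)]
    simp

lemma zip_tail_eq (span : List (Int × Int)) :
    span.zip span.tail = (List.range (span.length - 1)).map
      (fun j => (span.getD j (0, 0), span.getD (j + 1) (0, 0))) := by
  induction span with
  | nil => simp
  | cons x rest ih =>
    cases rest with
    | nil => simp
    | cons y rest' =>
      simp only [List.tail_cons, List.zip_cons_cons, List.length_cons, Nat.add_sub_cancel,
        List.range_succ_eq_map, List.map_cons, List.map_map]
      rw [List.tail_cons] at ih
      rw [ih]
      simp [Function.comp_def]

lemma checker_eq (span : List (Int × Int)) : spanChecker span = checkAlt span := by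
  by_cases hnil : span = []
  · subst hnil; rfl
  · have hl : 1 ≤ span.length := List.length_pos_iff.mpr hnil
    simp only [spanChecker, checkAlt]
    have hbody : List.foldl (fun (result : Bool) (i : Int) =>
        if i < (span.length : Int) - 1 then
          if (PySem.List.pyGetD span (i + 1) (0, 0)).1 - (PySem.List.pyGetD span i (0, 0)).2 ≠ 2 ∧
              (PySem.List.pyGetD span (i + 1) (0, 0)).1 - (PySem.List.pyGetD span i (0, 0)).2 ≠ 3
          then false else result
        else result) true (PySem.List.pyRange 0 (span.length : Int) 1)
        = List.foldl (fun (result : Bool) (i : Int) =>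
        if (decide (i < (span.length : Int) - 1) &&
            !((PySem.List.pyGetD span (i + 1) (0, 0)).1 - (PySem.List.pyGetD span i (0, 0)).2 == 2 ||
              (PySem.List.pyGetD span (i + 1) (0, 0)).1 - (PySem.List.pyGetD span i (0, 0)).2 == 3))
        then false else result) true (PySem.List.pyRange 0 (span.length : Int) 1) := by
      apply PySem.List.foldl_congr_mem
      intro acc i _
      by_cases h1 : i < (span.length : Int) - 1
      · by_cases h2 : (PySem.List.pyGetD span (i + 1) (0, 0)).1 - (PySem.List.pyGetD span i (0, 0)).2 ≠ 2 ∧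
            (PySem.List.pyGetD span (i + 1) (0, 0)).1 - (PySem.List.pyGetD span i (0, 0)).2 ≠ 3
        · simp [h1, h2.1, h2.2]
        · simp only [not_and_or, not_not] at h2
          rcases h2 with h2 | h2 <;> simp [h1, h2]
      · simp [h1]
    rw [hbody, PySem.List.foldl_if_false_eq, Bool.true_and]
    rw [PySem.List.pyRange_one_append 0 ((span.length : Int) - 1) (span.length : Int)
      (by omega) (by omega), List.any_append]
    have hsing : PySem.List.pyRange ((span.length : Int) - 1) (span.length : Int) 1 =
        [(span.length : Int) - 1] := by
      have h : (span.length : Int) = ((span.length : Int) - 1) + 1 := by omega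
      rw [h]
      have := PySem.List.pyRange_one_singleton ((span.length : Int) - 1)
      simpa using this
    rw [hsing]
    simp only [List.any_cons, List.any_nil, lt_self_iff_false, decide_false,
      Bool.false_and, Bool.or_false]
    have hguard : (PySem.List.pyRange 0 ((span.length : Int) - 1) 1).any
        (fun i => decide (i < (span.length : Int) - 1) &&
          !((PySem.List.pyGetD span (i + 1) (0, 0)).1 - (PySem.List.pyGetD span i (0, 0)).2 == 2 ||
            (PySem.List.pyGetD span (i + 1) (0, 0)).1 - (PySem.List.pyGetD span i (0, 0)).2 == 3))
        = (PySem.List.pyRange 0 ((span.length : Int) - 1) 1).any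
        (fun i =>
          !((PySem.List.pyGetD span (i + 1) (0, 0)).1 - (PySem.List.pyGetD span i (0, 0)).2 == 2 ||
            (PySem.List.pyGetD span (i + 1) (0, 0)).1 - (PySem.List.pyGetD span i (0, 0)).2 == 3)) := by
      apply PySem.List.any_congr_mem
      intro i hi
      rw [PySem.List.mem_pyRange_one] at hi
      simp [show i < (span.length : Int) - 1 by omega]
    rw [hguard, ← List.all_eq_not_any_not]
    rw [zip_tail_eq, List.all_map, PySem.List.pyRange_one, List.all_map]
    have hcnt : ((span.length : Int) - 1 - 0).toNat = span.length - 1 := by omega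
    rw [hcnt]
    rw [List.all_eq_not_any_not, List.all_eq_not_any_not]
    congr 1
    apply PySem.List.any_congr_mem
    intro k hk
    have e1 : (0 : Int) + (k : Int) = ((k : Nat) : Int) := by omega
    have e2 : ((k : Nat) : Int) + 1 = (((k + 1 : Nat)) : Int) := by omega
    simp only [Function.comp_def]
    rw [e1, e2, PySem.List.pyGetD_natCast, PySem.List.pyGetD_natCast]

lemma span_eq (m : Int) (span : List (Int × Int)) (h : 2 ≤ span.length) :
    pvAspan m span = spanLabelsAlt m span := by
  have hnil : span ≠ [] := by
    intro hs; rw [hs] at h; simp at h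
  have hlen1 : span.length - 1 < span.length := by omega
  have hlast : PySem.List.pyGetD span ((span.length : Int) - 1) (0, 0) =
      PySem.List.pyGetD span (-1) (0, 0) := by
    rw [PySem.List.pyGetD_neg_one span (0, 0) hnil]
    have e : ((span.length : Int) - 1) = ((span.length - 1 : Nat) : Int) := by omega
    rw [e, PySem.List.pyGetD_natCast, List.getLast_eq_getElem,
      List.getD_eq_getElem span (0, 0) hlen1]
  simp only [pvAspan, spanLabelsAlt]
  rw [hlast]
  -- split the j-range 0 :: [1, L-1) ++ [L-1]
  rw [PySem.List.pyRange_one_cons (by omega : (0 : Int) < (span.length : Int)),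
    (by norm_num : (0 : Int) + 1 = 1),
    PySem.List.pyRange_one_append 1 ((span.length : Int) - 1) (span.length : Int)
      (by omega) (by omega)]
  have hsing : PySem.List.pyRange ((span.length : Int) - 1) (span.length : Int) 1 =
      [(span.length : Int) - 1] := by
    have e : (span.length : Int) = ((span.length : Int) - 1) + 1 := by omega
    rw [e]
    simpa using PySem.List.pyRange_one_singleton ((span.length : Int) - 1)
  rw [hsing]
  simp only [List.foldl_cons, List.foldl_append, List.foldl_nil, if_true]
  -- reduce the j = L-1 application, then the j = 0 one
  rw [if_neg (by omega : ¬ (span.length : Int) - 1 = 0)]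
  rw [loopO_eq, loopBefore_true, loopAfter_true, loopO_eq]
  rw [hlast]
  -- the middle js (1 ≤ j < L-1) each append one closed-form segment
  have hmid : ∀ init : List String, List.foldl
      (fun labels j =>
        if j = 0 then
          loopBefore (PySem.List.pyGetD span j (0, 0)).1 (PySem.List.pyGetD span (j + 1) (0, 0)).1
            ((PySem.List.pyGetD span (-1) (0, 0)).1 - 1) true
            (loopO 0 (PySem.List.pyGetD span 0 (0, 0)).1 labels)
        else
          if j = (span.length : Int) - 1 then
            loopO ((PySem.List.pyGetD span (-1) (0, 0)).2 + 1) m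
              (loopAfter (PySem.List.pyGetD span j (0, 0)).1 (PySem.List.pyGetD span (-1) (0, 0)).2
                true labels)
          else
            loopBefore (PySem.List.pyGetD span j (0, 0)).1 (PySem.List.pyGetD span (j + 1) (0, 0)).1
              ((PySem.List.pyGetD span (-1) (0, 0)).1 - 1) true labels)
      init (PySem.List.pyRange 1 ((span.length : Int) - 1) 1)
      = init ++ (PySem.List.pyRange 1 ((span.length : Int) - 1) 1).flatMap
          (fun j => segAlt (PySem.List.pyGetD span j (0, 0)).1
            (PySem.List.pyGetD span (j + 1) (0, 0)).1
            ((PySem.List.pyGetD span (-1) (0, 0)).1 - 1)) := by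
    intro init
    have hpt : ∀ (acc : List String) (j : Int), j ∈ PySem.List.pyRange 1 ((span.length : Int) - 1) 1 →
        (fun (labels : List String) (j : Int) =>
          if j = 0 then
            loopBefore (PySem.List.pyGetD span j (0, 0)).1 (PySem.List.pyGetD span (j + 1) (0, 0)).1
              ((PySem.List.pyGetD span (-1) (0, 0)).1 - 1) true
              (loopO 0 (PySem.List.pyGetD span 0 (0, 0)).1 labels)
          else
            if j = (span.length : Int) - 1 then
              loopO ((PySem.List.pyGetD span (-1) (0, 0)).2 + 1) m
                (loopAfter (PySem.List.pyGetD span j (0, 0)).1 (PySem.List.pyGetD span (-1) (0, 0)).2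
                  true labels)
            else
              loopBefore (PySem.List.pyGetD span j (0, 0)).1 (PySem.List.pyGetD span (j + 1) (0, 0)).1
                ((PySem.List.pyGetD span (-1) (0, 0)).1 - 1) true labels) acc j
        = (fun (labels : List String) (j : Int) => labels ++
            segAlt (PySem.List.pyGetD span j (0, 0)).1 (PySem.List.pyGetD span (j + 1) (0, 0)).1
              ((PySem.List.pyGetD span (-1) (0, 0)).1 - 1)) acc j := by
      intro acc j hj
      rw [PySem.List.mem_pyRange_one] at hj
      simp only []
      rw [if_neg (by omega), if_neg (by omega), loopBefore_true]
    rw [PySem.List.foldl_congr_mem _ _ _ _ hpt, PySem.List.foldl_append_eq_flatMap]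
  rw [hmid]
  -- B's flatMap over zip(span, span[1:]) is the flatMap over the index range 0..L-2
  have hzip : (span.zip span.tail).flatMap
      (fun p => segAlt p.1.1 p.2.1 ((PySem.List.pyGetD span (-1) (0, 0)).1 - 1))
      = (PySem.List.pyRange 0 ((span.length : Int) - 1) 1).flatMap
          (fun j => segAlt (PySem.List.pyGetD span j (0, 0)).1
            (PySem.List.pyGetD span (j + 1) (0, 0)).1
            ((PySem.List.pyGetD span (-1) (0, 0)).1 - 1)) := by
    rw [zip_tail_eq, List.flatMap_map, PySem.List.pyRange_one, List.flatMap_map]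
    have hcnt : ((span.length : Int) - 1 - 0).toNat = span.length - 1 := by omega
    rw [hcnt]
    apply List.flatMap_congr
    intro k _
    have e1 : (0 : Int) + (k : Int) = ((k : Nat) : Int) := by omega
    have e2 : ((k : Nat) : Int) + 1 = (((k + 1 : Nat)) : Int) := by omega
    rw [e1, e2, PySem.List.pyGetD_natCast, PySem.List.pyGetD_natCast]
  rw [hzip]
  have hcons : PySem.List.pyRange 0 ((span.length : Int) - 1) 1 =
      0 :: PySem.List.pyRange 1 ((span.length : Int) - 1) 1 := by
    rw [PySem.List.pyRange_one_cons (by omega : (0 : Int) < (span.length : Int) - 1)]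
    norm_num
  rw [hcons, List.flatMap_cons]
  -- counts
  have c1 : ((PySem.List.pyGetD span 0 (0, 0)).1 - 0).toNat =
      (max 0 (PySem.List.pyGetD span 0 (0, 0)).1).toNat := by omega
  have c2 : (m - ((PySem.List.pyGetD span (-1) (0, 0)).2 + 1)).toNat =
      (max 0 (m - (PySem.List.pyGetD span (-1) (0, 0)).2 - 1)).toNat := by omega
  rw [c1, c2]
  by_cases hle : (PySem.List.pyGetD span (-1) (0, 0)).1 ≤ (PySem.List.pyGetD span (-1) (0, 0)).2
  · rw [if_pos hle, if_pos (by omega :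
      (PySem.List.pyGetD span (-1) (0, 0)).2 - (PySem.List.pyGetD span (-1) (0, 0)).1 + 1 ≥ 1)]
    have c3 : ((PySem.List.pyGetD span (-1) (0, 0)).2 - (PySem.List.pyGetD span (-1) (0, 0)).1).toNat =
        ((PySem.List.pyGetD span (-1) (0, 0)).2 - (PySem.List.pyGetD span (-1) (0, 0)).1 + 1 - 1).toNat := by
      omega
    rw [c3]
    simp [List.append_assoc]
  · rw [if_neg hle, if_neg (by omega : ¬ (PySem.List.pyGetD span (-1) (0, 0)).2 -
      (PySem.List.pyGetD span (-1) (0, 0)).1 + 1 ≥ 1)]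
    simp [List.append_assoc]

-- ===== VERDICT (by name: the statement is the Claim_ definition above) =====
theorem getLabels_spec : Claim_equal_getLabels := by
  intro s spans _hdom
  unfold Spec_getLabels
  cases spans with
  | none => rfl
  | some sp =>
    simp only [getLabels, getLabels_alt, Option.map_some, Option.some.injEq]
    have hbody : ∀ (acc : List (List String)) (span : List (Int × Int)), span ∈ sp →
        (fun (labels_set : List (List String)) (span : List (Int × Int)) =>
          if span.length < 2 then labels_set
          else if spanChecker span then labels_set ++ [pvAspan (s.length : Int) span]
          else labels_set) acc span
        = (fun (labels_set : List (List String)) (span : List (Int × Int)) =>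
            if (decide (span.length ≥ 2) && checkAlt span) = true then
              labels_set ++ [pvAspan (s.length : Int) span]
            else labels_set) acc span := by
      intro acc span _
      simp only []
      by_cases h2 : span.length < 2
      · rw [if_pos h2, if_neg (by simp; omega)]
      · rw [if_neg h2, ← checker_eq]
        by_cases hch : spanChecker span
        · rw [if_pos hch, if_pos (by simp [hch]; omega)]
        · rw [if_neg hch, if_neg (by simp [hch])]
    rw [PySem.List.foldl_congr_mem _ _ _ _ hbody,
      PySem.List.foldl_append_if (fun span => decide (span.length ≥ 2) && checkAlt span)
        (fun span => pvAspan (s.length : Int) span)]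
    rw [List.nil_append]
    apply List.map_congr_left
    intro span hsp
    rw [List.mem_filter] at hsp
    exact span_eq (s.length : Int) span (by
      have := hsp.2
      simp only [Bool.and_eq_true, decide_eq_true_eq] at this
      exact this.1)
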